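-- pv_equiv track=rewrite | github.com/garyohosu/virtual-company | kick_system.py | _update_order_content
-- ===== SOURCE A (Python) =====
-- from typing import Iterable, Optional
--
-- META_KEYS = {
--     "Status": "**Status**:",
--     "Current Actor": "**Current Actor**:",
--     "Next Actor": "**Next Actor**:",
--     "Previous Actor": "**Previous Actor**:",
--     "Completed At": "**Completed At**:",
-- }
--
-- def _update_order_content(
--     text: str, current_actor: str, next_actor: str, timestamp: str
-- ) -> str:
--     lines = text.splitlines()
--     updated = []
--     found = {key: False for key in META_KEYS}
--
--     for line in lines:
--         stripped = line.strip()
--         if stripped.startswith(META_KEYS["Status"]):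
--             updated.append(f"**Status**: Waiting for {next_actor}")
--             found["Status"] = True
--             continue
--         if stripped.startswith(META_KEYS["Current Actor"]):
--             updated.append(f"**Current Actor**: {next_actor}")
--             found["Current Actor"] = True
--             continue
--         if stripped.startswith(META_KEYS["Previous Actor"]):
--             updated.append(f"**Previous Actor**: {current_actor}")
--             found["Previous Actor"] = True
--             continue
--         if stripped.startswith(META_KEYS["Completed At"]):
--             updated.append(f"**Completed At**: {timestamp}")
--             found["Completed At"] = True
--             continue
--         updated.append(line)
--
--     if not found["Previous Actor"]:
--         updated = _insert_after(
--             updated,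
--             lambda l: l.strip().startswith(META_KEYS["Current Actor"]),
--             [f"**Previous Actor**: {current_actor}"],
--         )
--     if not found["Completed At"]:
--         updated = _insert_after(
--             updated,
--             lambda l: l.strip().startswith(META_KEYS["Previous Actor"]),
--             [f"**Completed At**: {timestamp}"],
--         )
--     return "\n".join(updated) + ("\n" if text.endswith("\n") else "")
--
-- def _insert_after(lines: list[str], predicate, new_lines: Iterable[str]) -> list[str]:
--     for i, line in enumerate(lines):
--         if predicate(line):
--             return lines[: i + 1] + list(new_lines) + lines[i + 1 :]
--     return lines + list(new_lines)
-- ===== SOURCE B (Python) =====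
-- META_KEYS = {
--     "Status": "**Status**:",
--     "Current Actor": "**Current Actor**:",
--     "Next Actor": "**Next Actor**:",
--     "Previous Actor": "**Previous Actor**:",
--     "Completed At": "**Completed At**:",
-- }
--
-- def _is_meta(key: str, line: str) -> bool:
--     return line.strip().startswith(key)
--
-- def _rewrite(line: str, current_actor: str, next_actor: str, timestamp: str) -> str:
--     if _is_meta(META_KEYS["Status"], line):
--         return f"**Status**: Waiting for {next_actor}"
--     if _is_meta(META_KEYS["Current Actor"], line):
--         return f"**Current Actor**: {next_actor}"
--     if _is_meta(META_KEYS["Previous Actor"], line):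
--         return f"**Previous Actor**: {current_actor}"
--     if _is_meta(META_KEYS["Completed At"], line):
--         return f"**Completed At**: {timestamp}"
--     return line
--
-- def _update_order_content(text: str, current_actor: str, next_actor: str, timestamp: str) -> str:
--     lines = text.splitlines()
--     # detection pass: which metadata lines already exist
--     has_prev = any(_is_meta(META_KEYS["Previous Actor"], l) for l in lines)
--     has_comp = any(_is_meta(META_KEYS["Completed At"], l) for l in lines)
--     prev_new = f"**Previous Actor**: {current_actor}"
--     comp_new = f"**Completed At**: {timestamp}"
--     # single rebuild pass: rewrite each line, inserting missing lines at their anchors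
--     out = []
--     ins_prev = ins_comp = False
--     for line in lines:
--         out.append(_rewrite(line, current_actor, next_actor, timestamp))
--         ins_prev_here = not has_prev and not ins_prev and _is_meta(META_KEYS["Current Actor"], line)
--         if ins_prev_here:
--             out.append(prev_new)
--             ins_prev = True
--         emitted_prev = _is_meta(META_KEYS["Previous Actor"], line) or ins_prev_here
--         if not has_comp and not ins_comp and emitted_prev:
--             out.append(comp_new)
--             ins_comp = True
--     # fallback: anchors never appeared, append at the end
--     if not has_prev and not ins_prev:
--         out.append(prev_new)
--         if not has_comp and not ins_comp:
--             out.append(comp_new)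
--             ins_comp = True
--     elif not has_comp and not ins_comp:
--         out.append(comp_new)
--     return "\n".join(out) + ("\n" if text.endswith("\n") else "")
-- ===== Notes on version B (the rewrite author's own statement) =====
-- stated objective: alternative
-- what changed: A rewrites lines into a list while tracking a found-dict and then runs two separate insert-after-first-match passes over the built list; B instead does one detection pass over the original lines and then a single rebuild pass that rewrites and inserts the missing Previous Actor / Completed At lines inline at their anchors, with an append-at-end fallback.
import Mathlib
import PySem

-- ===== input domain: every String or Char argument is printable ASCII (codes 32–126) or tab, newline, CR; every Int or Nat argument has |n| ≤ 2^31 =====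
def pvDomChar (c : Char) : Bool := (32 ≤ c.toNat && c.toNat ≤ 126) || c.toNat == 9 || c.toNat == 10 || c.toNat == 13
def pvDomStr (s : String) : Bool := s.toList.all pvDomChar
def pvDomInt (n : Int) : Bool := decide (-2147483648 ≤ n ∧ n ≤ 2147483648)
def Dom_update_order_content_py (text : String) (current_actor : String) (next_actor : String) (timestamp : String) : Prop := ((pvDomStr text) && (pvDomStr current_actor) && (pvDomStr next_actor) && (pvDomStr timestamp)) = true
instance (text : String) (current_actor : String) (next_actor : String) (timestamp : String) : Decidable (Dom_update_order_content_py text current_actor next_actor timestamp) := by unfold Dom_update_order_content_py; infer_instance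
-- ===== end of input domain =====

-- B replaces A's rewrite-then-two-insert-after-passes pipeline by one detection pass plus a
-- single rebuild pass that inserts the missing metadata lines inline (objective: alternative).

-- ===== PORT A =====
def META_KEYS : PySem.Dict String String :=
  PySem.Dict.ofList [("Status", "**Status**:"), ("Current Actor", "**Current Actor**:"),
    ("Next Actor", "**Next Actor**:"), ("Previous Actor", "**Previous Actor**:"),
    ("Completed At", "**Completed At**:")]

def pvInsertAfter : List String → (String → Bool) → List String → List String
  | [], _, newLines => newLines
  | l :: rest, p, newLines =>
      if p l then l :: (newLines ++ rest) else l :: pvInsertAfter rest p newLines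

def pvAStep (current_actor next_actor timestamp : String)
    (st : List String × PySem.Dict String Bool) (line : String) :
    List String × PySem.Dict String Bool :=
  let stripped := PySem.Str.strip line
  if PySem.Str.startswith stripped (META_KEYS.getD "Status" "") then
    (st.1 ++ ["**Status**: Waiting for " ++ next_actor], st.2.insert "Status" true)
  else if PySem.Str.startswith stripped (META_KEYS.getD "Current Actor" "") then
    (st.1 ++ ["**Current Actor**: " ++ next_actor], st.2.insert "Current Actor" true)
  else if PySem.Str.startswith stripped (META_KEYS.getD "Previous Actor" "") then
    (st.1 ++ ["**Previous Actor**: " ++ current_actor], st.2.insert "Previous Actor" true)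
  else if PySem.Str.startswith stripped (META_KEYS.getD "Completed At" "") then
    (st.1 ++ ["**Completed At**: " ++ timestamp], st.2.insert "Completed At" true)
  else
    (st.1 ++ [line], st.2)

def update_order_content_py (text : String) (current_actor : String) (next_actor : String) (timestamp : String) : String :=
  let lines := PySem.Str.splitlines text
  let res := lines.foldl (pvAStep current_actor next_actor timestamp)
    ([], PySem.Dict.ofList ((PySem.Dict.keys META_KEYS).map (fun k => (k, false))))
  let updated := res.1
  let found := res.2
  let updated :=
    if !(found.getD "Previous Actor" false) then
      pvInsertAfter updated
        (fun l => PySem.Str.startswith (PySem.Str.strip l) (META_KEYS.getD "Current Actor" ""))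
        ["**Previous Actor**: " ++ current_actor]
    else updated
  let updated :=
    if !(found.getD "Completed At" false) then
      pvInsertAfter updated
        (fun l => PySem.Str.startswith (PySem.Str.strip l) (META_KEYS.getD "Previous Actor" ""))
        ["**Completed At**: " ++ timestamp]
    else updated
  PySem.Str.join "\n" updated ++ (if PySem.Str.endswith text "\n" then "\n" else "")

-- ===== PORT B =====
def pvIsMeta (key : String) (line : String) : Bool :=
  PySem.Str.startswith (PySem.Str.strip line) key

def pvRewriteLine (current_actor next_actor timestamp line : String) : String :=
  if pvIsMeta "**Status**:" line then "**Status**: Waiting for " ++ next_actor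
  else if pvIsMeta "**Current Actor**:" line then "**Current Actor**: " ++ next_actor
  else if pvIsMeta "**Previous Actor**:" line then "**Previous Actor**: " ++ current_actor
  else if pvIsMeta "**Completed At**:" line then "**Completed At**: " ++ timestamp
  else line

def pvAltStep (hasPrev hasComp : Bool) (current_actor next_actor timestamp : String)
    (st : List String × Bool × Bool) (line : String) : List String × Bool × Bool :=
  let out := st.1 ++ [pvRewriteLine current_actor next_actor timestamp line]
  let insPrevHere := !hasPrev && !st.2.1 && pvIsMeta "**Current Actor**:" line
  let out := if insPrevHere then out ++ ["**Previous Actor**: " ++ current_actor] else out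
  let emittedPrev := pvIsMeta "**Previous Actor**:" line || insPrevHere
  let insCompHere := !hasComp && !st.2.2 && emittedPrev
  let out := if insCompHere then out ++ ["**Completed At**: " ++ timestamp] else out
  (out, st.2.1 || insPrevHere, st.2.2 || insCompHere)

def update_order_content_py_alt (text : String) (current_actor : String) (next_actor : String) (timestamp : String) : String :=
  let lines := PySem.Str.splitlines text
  let hasPrev := lines.any (pvIsMeta "**Previous Actor**:")
  let hasComp := lines.any (pvIsMeta "**Completed At**:")
  let st := lines.foldl (pvAltStep hasPrev hasComp current_actor next_actor timestamp) ([], false, false)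
  let out :=
    if !hasPrev && !st.2.1 then
      let out := st.1 ++ ["**Previous Actor**: " ++ current_actor]
      if !hasComp && !st.2.2 then out ++ ["**Completed At**: " ++ timestamp] else out
    else if !hasComp && !st.2.2 then st.1 ++ ["**Completed At**: " ++ timestamp]
    else st.1
  PySem.Str.join "\n" out ++ (if PySem.Str.endswith text "\n" then "\n" else "")

-- ===== PRECONDITION & SPEC =====
def Spec_update_order_content_py (text : String) (current_actor : String) (next_actor : String) (timestamp : String) (out : String) : Prop := out = update_order_content_py_alt text current_actor next_actor timestamp
instance (text : String) (current_actor : String) (next_actor : String) (timestamp : String) (out : String) : Decidable (Spec_update_order_content_py text current_actor next_actor timestamp out) := by unfold Spec_update_order_content_py; infer_instance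

-- ===== CLAIM (what is proved, stated in full; the proofs are below) =====
def Claim_equal_update_order_content_py : Prop := ∀ (text : String) (current_actor : String) (next_actor : String) (timestamp : String), Dom_update_order_content_py text current_actor next_actor timestamp → Spec_update_order_content_py text current_actor next_actor timestamp (update_order_content_py text current_actor next_actor timestamp)

-- ===== LEMMAS AND PROOFS =====

-- literal facts about META_KEYS lookups
lemma metaS : META_KEYS.getD "Status" "" = "**Status**:" := by decide
lemma metaC : META_KEYS.getD "Current Actor" "" = "**Current Actor**:" := by decide
lemma metaP : META_KEYS.getD "Previous Actor" "" = "**Previous Actor**:" := by decide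
lemma metaT : META_KEYS.getD "Completed At" "" = "**Completed At**:" := by decide

lemma pvIsMeta_def (k l : String) :
    PySem.Str.startswith (PySem.Str.strip l) k = pvIsMeta k l := rfl

-- a key that is a prefix of a string with a non-space head and non-space key-last survives strip
lemma pvKey_prefix_strip (key t : List Char)
    (hpre : key <+: t)
    (hh : ∀ c, t.head? = some c → PySem.Chars.isspace c = false)
    (hl : ∀ c, key.getLast? = some c → PySem.Chars.isspace c = false) :
    key <+: PySem.Chars.strip t := by
  rcases List.eq_nil_or_concat key with rfl | ⟨k', c, rfl⟩
  · exact List.nil_prefix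
  · have hc : PySem.Chars.isspace c = false := hl c (by simp)
    have hlt : PySem.Chars.lstrip t = t := by
      cases t with
      | nil => rfl
      | cons a t' =>
        have ha : PySem.Chars.isspace a = false := hh a rfl
        simp [PySem.Chars.lstrip, ha]
    rw [PySem.Chars.strip, hlt, PySem.Chars.rstrip]
    obtain ⟨r, rfl⟩ := hpre
    have hsuf : (k' ++ [c]).reverse <:+ List.dropWhile PySem.Chars.isspace (k' ++ [c] ++ r).reverse := by
      have hrev : (k' ++ [c] ++ r).reverse = r.reverse ++ (c :: k'.reverse) := by simp
      rw [hrev, List.dropWhile_append]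
      split
      · rw [List.dropWhile_cons, hc]
        simp
      · simp [List.suffix_append]
    have := List.reverse_prefix.mpr hsuf
    simpa using this

-- two incomparable keys cannot both be startswith-prefixes of the same stripped line
lemma pvIsMeta_false_of_isMeta {k1 k2 l : String}
    (h : pvIsMeta k1 l = true)
    (h12 : ¬ k1.toList <+: k2.toList) (h21 : ¬ k2.toList <+: k1.toList) :
    pvIsMeta k2 l = false := by
  have h1 : k1.toList <+: (PySem.Str.strip l).toList := by
    rw [pvIsMeta, PySem.Str.startswith] at h
    exact (PySem.Chars.startswith_iff _ _).1 h
  by_contra hne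
  have h2' : pvIsMeta k2 l = true := by
    cases hb : pvIsMeta k2 l
    · exact absurd hb hne
    · rfl
  have h2 : k2.toList <+: (PySem.Str.strip l).toList := by
    rw [pvIsMeta, PySem.Str.startswith] at h2'
    exact (PySem.Chars.startswith_iff _ _).1 h2'
  rcases List.prefix_or_prefix_of_prefix h1 h2 with hp | hp
  · exact h12 hp
  · exact h21 hp

-- a freshly built metadata line starts (after strip) with its own key
lemma pvIsMeta_concat_true (key kfull s : String)
    (hpre : key.toList <+: kfull.toList)
    (hh : kfull.toList.head? = some '*')
    (hl : key.toList.getLast? = some ':') :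
    pvIsMeta key (kfull ++ s) = true := by
  rw [pvIsMeta, PySem.Str.startswith]
  apply (PySem.Chars.startswith_iff _ _).2
  have hlist : (PySem.Str.strip (kfull ++ s)).toList
      = PySem.Chars.strip (kfull.toList ++ s.toList) := by
    simp [PySem.Str.strip, String.toList_append]
  rw [hlist]
  apply pvKey_prefix_strip
  · exact hpre.trans (List.prefix_append _ _)
  · intro c hc
    rcases hk : kfull.toList with _ | ⟨a, tl⟩
    · rw [hk] at hh; simp at hh
    · rw [hk] at hh hc
      simp only [List.head?_cons, Option.some.injEq, List.cons_append] at hh hc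
      rw [← hc, hh]
      decide
  · intro c hc
    rw [hl] at hc
    injection hc with hc
    rw [← hc]
    decide

-- the four constructed lines vs the two keys the proof tracks
lemma isP_statusNew (s : String) : pvIsMeta "**Previous Actor**:" ("**Status**: Waiting for " ++ s) = false :=
  pvIsMeta_false_of_isMeta
    (pvIsMeta_concat_true "**Status**:" "**Status**: Waiting for " s (by decide) (by decide) (by decide))
    (by decide) (by decide)

lemma isC_statusNew (s : String) : pvIsMeta "**Current Actor**:" ("**Status**: Waiting for " ++ s) = false :=
  pvIsMeta_false_of_isMeta
    (pvIsMeta_concat_true "**Status**:" "**Status**: Waiting for " s (by decide) (by decide) (by decide))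
    (by decide) (by decide)

lemma isC_curNew (s : String) : pvIsMeta "**Current Actor**:" ("**Current Actor**: " ++ s) = true :=
  pvIsMeta_concat_true "**Current Actor**:" "**Current Actor**: " s (by decide) (by decide) (by decide)

lemma isP_curNew (s : String) : pvIsMeta "**Previous Actor**:" ("**Current Actor**: " ++ s) = false :=
  pvIsMeta_false_of_isMeta (isC_curNew s) (by decide) (by decide)

lemma isP_prevNew (s : String) : pvIsMeta "**Previous Actor**:" ("**Previous Actor**: " ++ s) = true :=
  pvIsMeta_concat_true "**Previous Actor**:" "**Previous Actor**: " s (by decide) (by decide) (by decide)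

lemma isC_prevNew (s : String) : pvIsMeta "**Current Actor**:" ("**Previous Actor**: " ++ s) = false :=
  pvIsMeta_false_of_isMeta (isP_prevNew s) (by decide) (by decide)

lemma isT_compNew (s : String) : pvIsMeta "**Completed At**:" ("**Completed At**: " ++ s) = true :=
  pvIsMeta_concat_true "**Completed At**:" "**Completed At**: " s (by decide) (by decide) (by decide)

lemma isP_compNew (s : String) : pvIsMeta "**Previous Actor**:" ("**Completed At**: " ++ s) = false :=
  pvIsMeta_false_of_isMeta (isT_compNew s) (by decide) (by decide)

lemma isC_compNew (s : String) : pvIsMeta "**Current Actor**:" ("**Completed At**: " ++ s) = false :=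
  pvIsMeta_false_of_isMeta (isT_compNew s) (by decide) (by decide)

-- exclusivity on an arbitrary line
lemma exSP {l : String} (h : pvIsMeta "**Status**:" l = true) : pvIsMeta "**Previous Actor**:" l = false :=
  pvIsMeta_false_of_isMeta h (by decide) (by decide)
lemma exSC {l : String} (h : pvIsMeta "**Status**:" l = true) : pvIsMeta "**Current Actor**:" l = false :=
  pvIsMeta_false_of_isMeta h (by decide) (by decide)
lemma exST {l : String} (h : pvIsMeta "**Status**:" l = true) : pvIsMeta "**Completed At**:" l = false :=
  pvIsMeta_false_of_isMeta h (by decide) (by decide)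
lemma exCP {l : String} (h : pvIsMeta "**Current Actor**:" l = true) : pvIsMeta "**Previous Actor**:" l = false :=
  pvIsMeta_false_of_isMeta h (by decide) (by decide)
lemma exCT {l : String} (h : pvIsMeta "**Current Actor**:" l = true) : pvIsMeta "**Completed At**:" l = false :=
  pvIsMeta_false_of_isMeta h (by decide) (by decide)
lemma exPT {l : String} (h : pvIsMeta "**Previous Actor**:" l = true) : pvIsMeta "**Completed At**:" l = false :=
  pvIsMeta_false_of_isMeta h (by decide) (by decide)

-- rewriting a line does not change whether it is a Current Actor / Previous Actor line
lemma pres_P (ca na ts l : String) :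
    pvIsMeta "**Previous Actor**:" (pvRewriteLine ca na ts l) = pvIsMeta "**Previous Actor**:" l := by
  unfold pvRewriteLine
  split_ifs with h1 h2 h3 h4
  · rw [isP_statusNew, exSP h1]
  · rw [isP_curNew, exCP h2]
  · rw [isP_prevNew, h3]
  · rw [isP_compNew, eq_comm, Bool.eq_false_iff]
    simpa using h3
  · rfl

lemma pres_C (ca na ts l : String) :
    pvIsMeta "**Current Actor**:" (pvRewriteLine ca na ts l) = pvIsMeta "**Current Actor**:" l := by
  unfold pvRewriteLine
  split_ifs with h1 h2 h3 h4
  · rw [isC_statusNew, exSC h1]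
  · rw [isC_curNew, h2]
  · rw [isC_prevNew, eq_comm, Bool.eq_false_iff]
    simpa using h2
  · rw [isC_compNew, eq_comm, Bool.eq_false_iff]
    simpa using h2
  · rfl

-- A's loop step written through pvIsMeta / pvRewriteLine
lemma pvAStep_eq (ca na ts : String) (st : List String × PySem.Dict String Bool) (l : String) :
    pvAStep ca na ts st l =
      (st.1 ++ [pvRewriteLine ca na ts l],
        if pvIsMeta "**Status**:" l then st.2.insert "Status" true
        else if pvIsMeta "**Current Actor**:" l then st.2.insert "Current Actor" true
        else if pvIsMeta "**Previous Actor**:" l then st.2.insert "Previous Actor" true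
        else if pvIsMeta "**Completed At**:" l then st.2.insert "Completed At" true
        else st.2) := by
  unfold pvAStep pvRewriteLine
  rw [metaS, metaC, metaP, metaT]
  simp only [pvIsMeta_def]
  split_ifs <;> rfl

-- characterisation of A's loop: rewritten lines, and the two found-flags
lemma loopA_fst (ca na ts : String) :
    ∀ (ls : List String) (acc : List String) (d : PySem.Dict String Bool),
      (ls.foldl (pvAStep ca na ts) (acc, d)).1 = acc ++ ls.map (pvRewriteLine ca na ts) := by
  intro ls
  induction ls with
  | nil => intro acc d; simp
  | cons l ls ih =>
    intro acc d
    rw [List.foldl_cons, pvAStep_eq]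
    rw [ih]
    simp

lemma loopA_prev (ca na ts : String) :
    ∀ (ls : List String) (acc : List String) (d : PySem.Dict String Bool),
      ((ls.foldl (pvAStep ca na ts) (acc, d)).2.getD "Previous Actor" false)
        = (d.getD "Previous Actor" false || ls.any (pvIsMeta "**Previous Actor**:")) := by
  intro ls
  induction ls with
  | nil => intro acc d; simp
  | cons l ls ih =>
    intro acc d
    rw [List.foldl_cons, pvAStep_eq]
    by_cases h1 : pvIsMeta "**Status**:" l = true
    · simp only [h1, if_true]
      rw [ih, PySem.Dict.getD_insert_of_ne _ _ _ (by decide)]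
      simp [exSP h1]
    · rw [if_neg (by simp [h1])]
      by_cases h2 : pvIsMeta "**Current Actor**:" l = true
      · simp only [h2, if_true]
        rw [ih, PySem.Dict.getD_insert_of_ne _ _ _ (by decide)]
        simp [exCP h2]
      · rw [if_neg (by simp [h2])]
        by_cases h3 : pvIsMeta "**Previous Actor**:" l = true
        · simp only [h3, if_true]
          rw [ih, PySem.Dict.getD_insert_self]
          simp [h3]
        · rw [if_neg (by simp [h3])]
          by_cases h4 : pvIsMeta "**Completed At**:" l = true
          · simp only [h4, if_true]
            rw [ih, PySem.Dict.getD_insert_of_ne _ _ _ (by decide)]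
            simp [Bool.eq_false_iff.2 h3]
          · rw [if_neg (by simp [h4])]
            rw [ih]
            simp [Bool.eq_false_iff.2 h3]

lemma loopA_comp (ca na ts : String) :
    ∀ (ls : List String) (acc : List String) (d : PySem.Dict String Bool),
      ((ls.foldl (pvAStep ca na ts) (acc, d)).2.getD "Completed At" false)
        = (d.getD "Completed At" false || ls.any (pvIsMeta "**Completed At**:")) := by
  intro ls
  induction ls with
  | nil => intro acc d; simp
  | cons l ls ih =>
    intro acc d
    rw [List.foldl_cons, pvAStep_eq]
    by_cases h1 : pvIsMeta "**Status**:" l = true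
    · simp only [h1, if_true]
      rw [ih, PySem.Dict.getD_insert_of_ne _ _ _ (by decide)]
      simp [exST h1]
    · rw [if_neg (by simp [h1])]
      by_cases h2 : pvIsMeta "**Current Actor**:" l = true
      · simp only [h2, if_true]
        rw [ih, PySem.Dict.getD_insert_of_ne _ _ _ (by decide)]
        simp [exCT h2]
      · rw [if_neg (by simp [h2])]
        by_cases h3 : pvIsMeta "**Previous Actor**:" l = true
        · simp only [h3, if_true]
          rw [ih, PySem.Dict.getD_insert_of_ne _ _ _ (by decide)]
          simp [exPT h3]
        · rw [if_neg (by simp [h3])]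
          by_cases h4 : pvIsMeta "**Completed At**:" l = true
          · simp only [h4, if_true]
            rw [ih, PySem.Dict.getD_insert_self]
            simp [h4]
          · rw [if_neg (by simp [h4])]
            rw [ih]
            simp [Bool.eq_false_iff.2 h4]

lemma initFound_prev :
    (PySem.Dict.ofList ((PySem.Dict.keys META_KEYS).map (fun k => (k, false)))).getD "Previous Actor" false = false := by decide

lemma initFound_comp :
    (PySem.Dict.ofList ((PySem.Dict.keys META_KEYS).map (fun k => (k, false)))).getD "Completed At" false = false := by decide

-- canonical result lists shared by both sides
def pvCompScan (ca na ts : String) : List String → List String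
  | [] => ["**Completed At**: " ++ ts]
  | l :: ls =>
      if pvIsMeta "**Previous Actor**:" l then
        pvRewriteLine ca na ts l :: ("**Completed At**: " ++ ts) :: ls.map (pvRewriteLine ca na ts)
      else pvRewriteLine ca na ts l :: pvCompScan ca na ts ls

def pvCurScan (withComp : Bool) (ca na ts : String) : List String → List String
  | [] => ("**Previous Actor**: " ++ ca) :: (if withComp then ["**Completed At**: " ++ ts] else [])
  | l :: ls =>
      if pvIsMeta "**Current Actor**:" l then
        pvRewriteLine ca na ts l :: ("**Previous Actor**: " ++ ca) ::
          (if withComp then ("**Completed At**: " ++ ts) :: ls.map (pvRewriteLine ca na ts)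
           else ls.map (pvRewriteLine ca na ts))
      else pvRewriteLine ca na ts l :: pvCurScan withComp ca na ts ls

lemma curScan_nomatch (wc : Bool) (ca na ts : String) :
    ∀ (ls : List String), (∀ l ∈ ls, pvIsMeta "**Current Actor**:" l = false) →
      pvCurScan wc ca na ts ls = ls.map (pvRewriteLine ca na ts)
        ++ (("**Previous Actor**: " ++ ca) :: (if wc then ["**Completed At**: " ++ ts] else [])) := by
  intro ls
  induction ls with
  | nil => intro _; rfl
  | cons l ls ih =>
    intro h
    rw [pvCurScan, if_neg (by simp [h l (List.mem_cons_self)])]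
    rw [ih (fun x hx => h x (List.mem_cons_of_mem _ hx))]
    simp

-- A's insert-after passes, fused with the rewrite map
lemma LA_comp (ca na ts : String) :
    ∀ (ls : List String),
      pvInsertAfter (ls.map (pvRewriteLine ca na ts)) (fun l => pvIsMeta "**Previous Actor**:" l)
          ["**Completed At**: " ++ ts]
        = pvCompScan ca na ts ls := by
  intro ls
  induction ls with
  | nil => rfl
  | cons l ls ih =>
    rw [List.map_cons, pvInsertAfter, pres_P, pvCompScan]
    by_cases h : pvIsMeta "**Previous Actor**:" l = true
    · simp [h]
    · simp only [Bool.eq_false_iff.2 h]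
      simp [ih]

lemma LA_cur (ca na ts : String) :
    ∀ (ls : List String),
      pvInsertAfter (ls.map (pvRewriteLine ca na ts)) (fun l => pvIsMeta "**Current Actor**:" l)
          ["**Previous Actor**: " ++ ca]
        = pvCurScan false ca na ts ls := by
  intro ls
  induction ls with
  | nil => rfl
  | cons l ls ih =>
    rw [List.map_cons, pvInsertAfter, pres_C, pvCurScan]
    by_cases h : pvIsMeta "**Current Actor**:" l = true
    · simp [h]
    · simp only [Bool.eq_false_iff.2 h]
      simp [ih]

lemma LA_cur_comp (ca na ts : String) :
    ∀ (ls : List String), (∀ l ∈ ls, pvIsMeta "**Previous Actor**:" l = false) →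
      pvInsertAfter (pvCurScan false ca na ts ls) (fun l => pvIsMeta "**Previous Actor**:" l)
          ["**Completed At**: " ++ ts]
        = pvCurScan true ca na ts ls := by
  intro ls
  induction ls with
  | nil =>
    intro _
    rw [pvCurScan, pvCurScan]
    simp [pvInsertAfter, isP_prevNew]
  | cons l ls ih =>
    intro h
    have hl : pvIsMeta "**Previous Actor**:" l = false := h l (List.mem_cons_self)
    rw [pvCurScan, pvCurScan]
    by_cases hc : pvIsMeta "**Current Actor**:" l = true
    · simp only [hc, if_true]
      rw [pvInsertAfter, pres_P, hl]
      simp [pvInsertAfter, isP_prevNew]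
    · simp only [Bool.eq_false_iff.2 hc, Bool.false_eq_true, if_false]
      rw [pvInsertAfter, pres_P, hl]
      simp [ih (fun x hx => h x (List.mem_cons_of_mem _ hx))]

-- B's loop, case by case on the two detection flags
lemma LB_tt (ca na ts : String) :
    ∀ (ls : List String) (acc : List String) (b1 b2 : Bool),
      ls.foldl (pvAltStep true true ca na ts) (acc, b1, b2)
        = (acc ++ ls.map (pvRewriteLine ca na ts), b1, b2) := by
  intro ls
  induction ls with
  | nil => intro acc b1 b2; simp
  | cons l ls ih =>
    intro acc b1 b2
    rw [List.foldl_cons]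
    show ls.foldl _ (pvAltStep true true ca na ts (acc, b1, b2) l) = _
    simp only [pvAltStep, Bool.not_true, Bool.false_and, Bool.and_false, if_neg (by simp : ¬ (false = true)), Bool.or_false]
    rw [ih]
    simp

lemma LB_tf_done (ca na ts : String) :
    ∀ (ls : List String) (acc : List String) (b1 : Bool),
      ls.foldl (pvAltStep true false ca na ts) (acc, b1, true)
        = (acc ++ ls.map (pvRewriteLine ca na ts), b1, true) := by
  intro ls
  induction ls with
  | nil => intro acc b1; simp
  | cons l ls ih =>
    intro acc b1
    rw [List.foldl_cons]
    simp only [pvAltStep, Bool.not_true, Bool.false_and, Bool.and_false, if_neg (by simp : ¬ (false = true)), Bool.or_false]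
    rw [ih]
    simp

lemma LB_tf (ca na ts : String) :
    ∀ (ls : List String) (acc : List String) (b1 : Bool),
      ls.foldl (pvAltStep true false ca na ts) (acc, b1, false)
        = (acc ++ (if ls.any (pvIsMeta "**Previous Actor**:") then pvCompScan ca na ts ls
                   else ls.map (pvRewriteLine ca na ts)),
           b1, ls.any (pvIsMeta "**Previous Actor**:")) := by
  intro ls
  induction ls with
  | nil => intro acc b1; simp
  | cons l ls ih =>
    intro acc b1
    rw [List.foldl_cons]
    by_cases h : pvIsMeta "**Previous Actor**:" l = true
    · have hstep : pvAltStep true false ca na ts (acc, b1, false) l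
          = (acc ++ [pvRewriteLine ca na ts l] ++ ["**Completed At**: " ++ ts], b1, true) := by
        simp [pvAltStep, h]
      rw [hstep, LB_tf_done]
      rw [List.any_cons]
      simp only [h, Bool.true_or, if_true]
      rw [pvCompScan]
      simp [h]
    · have hstep : pvAltStep true false ca na ts (acc, b1, false) l
          = (acc ++ [pvRewriteLine ca na ts l], b1, false) := by
        simp [pvAltStep, Bool.eq_false_iff.2 h]
      rw [hstep, ih]
      rw [List.any_cons]
      simp only [Bool.eq_false_iff.2 h, Bool.false_eq_true, Bool.false_or]
      rw [pvCompScan]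
      simp only [Bool.eq_false_iff.2 h, Bool.false_eq_true, if_false]
      by_cases ha : ls.any (pvIsMeta "**Previous Actor**:") = true
      · simp [ha]
      · simp [Bool.eq_false_iff.2 ha]

lemma LB_ft_done (ca na ts : String) :
    ∀ (ls : List String) (acc : List String) (b2 : Bool),
      ls.foldl (pvAltStep false true ca na ts) (acc, true, b2)
        = (acc ++ ls.map (pvRewriteLine ca na ts), true, b2) := by
  intro ls
  induction ls with
  | nil => intro acc b2; simp
  | cons l ls ih =>
    intro acc b2
    rw [List.foldl_cons]
    simp only [pvAltStep, Bool.not_true, Bool.not_false, Bool.false_and, Bool.true_and, Bool.and_false,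
      if_neg (by simp : ¬ (false = true)), Bool.or_false]
    rw [ih]
    simp

lemma LB_ft (ca na ts : String) :
    ∀ (ls : List String) (acc : List String) (b2 : Bool),
      ls.foldl (pvAltStep false true ca na ts) (acc, false, b2)
        = (acc ++ (if ls.any (pvIsMeta "**Current Actor**:") then pvCurScan false ca na ts ls
                   else ls.map (pvRewriteLine ca na ts)),
           ls.any (pvIsMeta "**Current Actor**:"), b2) := by
  intro ls
  induction ls with
  | nil => intro acc b2; simp
  | cons l ls ih =>
    intro acc b2
    rw [List.foldl_cons]
    by_cases h : pvIsMeta "**Current Actor**:" l = true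
    · have hstep : pvAltStep false true ca na ts (acc, false, b2) l
          = (acc ++ [pvRewriteLine ca na ts l] ++ ["**Previous Actor**: " ++ ca], true, b2) := by
        simp [pvAltStep, h]
      rw [hstep, LB_ft_done]
      rw [List.any_cons]
      simp only [h, Bool.true_or, if_true]
      rw [pvCurScan]
      simp [h]
    · have hstep : pvAltStep false true ca na ts (acc, false, b2) l
          = (acc ++ [pvRewriteLine ca na ts l], false, b2) := by
        simp [pvAltStep, Bool.eq_false_iff.2 h]
      rw [hstep, ih]
      rw [List.any_cons]
      simp only [Bool.eq_false_iff.2 h, Bool.false_eq_true, Bool.false_or]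
      rw [pvCurScan]
      simp only [Bool.eq_false_iff.2 h, Bool.false_eq_true, if_false]
      by_cases ha : ls.any (pvIsMeta "**Current Actor**:") = true
      · simp [ha]
      · simp [Bool.eq_false_iff.2 ha]

lemma LB_ff_done (ca na ts : String) :
    ∀ (ls : List String) (acc : List String),
      ls.foldl (pvAltStep false false ca na ts) (acc, true, true)
        = (acc ++ ls.map (pvRewriteLine ca na ts), true, true) := by
  intro ls
  induction ls with
  | nil => intro acc; simp
  | cons l ls ih =>
    intro acc
    rw [List.foldl_cons]
    simp only [pvAltStep, Bool.not_true, Bool.false_and, Bool.and_false, if_neg (by simp : ¬ (false = true)), Bool.or_false]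
    rw [ih]
    simp

lemma LB_ff (ca na ts : String) :
    ∀ (ls : List String), (∀ l ∈ ls, pvIsMeta "**Previous Actor**:" l = false) →
      ∀ (acc : List String),
      ls.foldl (pvAltStep false false ca na ts) (acc, false, false)
        = (acc ++ (if ls.any (pvIsMeta "**Current Actor**:") then pvCurScan true ca na ts ls
                   else ls.map (pvRewriteLine ca na ts)),
           ls.any (pvIsMeta "**Current Actor**:"), ls.any (pvIsMeta "**Current Actor**:")) := by
  intro ls
  induction ls with
  | nil => intro _ acc; simp
  | cons l ls ih =>
    intro h acc
    have hl : pvIsMeta "**Previous Actor**:" l = false := h l (List.mem_cons_self)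
    rw [List.foldl_cons]
    by_cases hc : pvIsMeta "**Current Actor**:" l = true
    · have hstep : pvAltStep false false ca na ts (acc, false, false) l
          = (acc ++ [pvRewriteLine ca na ts l] ++ ["**Previous Actor**: " ++ ca]
              ++ ["**Completed At**: " ++ ts], true, true) := by
        simp [pvAltStep, hc, hl]
      rw [hstep, LB_ff_done]
      rw [List.any_cons]
      simp only [hc, Bool.true_or, if_true]
      rw [pvCurScan]
      simp [hc]
    · have hstep : pvAltStep false false ca na ts (acc, false, false) l
          = (acc ++ [pvRewriteLine ca na ts l], false, false) := by
        simp [pvAltStep, Bool.eq_false_iff.2 hc, hl]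
      rw [hstep, ih (fun x hx => h x (List.mem_cons_of_mem _ hx))]
      rw [List.any_cons]
      simp only [Bool.eq_false_iff.2 hc, Bool.false_eq_true, Bool.false_or]
      rw [pvCurScan]
      simp only [Bool.eq_false_iff.2 hc, Bool.false_eq_true, if_false]
      by_cases ha : ls.any (pvIsMeta "**Current Actor**:") = true
      · simp [ha]
      · simp [Bool.eq_false_iff.2 ha]

-- the two final line lists agree
lemma pvLines_eq (ca na ts : String) (lines : List String) :
    (let res := lines.foldl (pvAStep ca na ts)
        ([], PySem.Dict.ofList ((PySem.Dict.keys META_KEYS).map (fun k => (k, false))))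
     let updated := res.1
     let found := res.2
     let updated :=
       if !(found.getD "Previous Actor" false) then
         pvInsertAfter updated
           (fun l => PySem.Str.startswith (PySem.Str.strip l) (META_KEYS.getD "Current Actor" ""))
           ["**Previous Actor**: " ++ ca]
       else updated
     if !(found.getD "Completed At" false) then
       pvInsertAfter updated
         (fun l => PySem.Str.startswith (PySem.Str.strip l) (META_KEYS.getD "Previous Actor" ""))
         ["**Completed At**: " ++ ts]
     else updated)
    =
    (let hasPrev := lines.any (pvIsMeta "**Previous Actor**:")
     let hasComp := lines.any (pvIsMeta "**Completed At**:")
     let st := lines.foldl (pvAltStep hasPrev hasComp ca na ts) ([], false, false)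
     if !hasPrev && !st.2.1 then
       let out := st.1 ++ ["**Previous Actor**: " ++ ca]
       if !hasComp && !st.2.2 then out ++ ["**Completed At**: " ++ ts] else out
     else if !hasComp && !st.2.2 then st.1 ++ ["**Completed At**: " ++ ts]
     else st.1) := by
  simp only [metaC, metaP, pvIsMeta_def]
  rw [loopA_fst, loopA_prev, loopA_comp, initFound_prev, initFound_comp]
  simp only [List.nil_append, Bool.false_or]
  by_cases hP : lines.any (pvIsMeta "**Previous Actor**:") = true
  · by_cases hT : lines.any (pvIsMeta "**Completed At**:") = true
    · rw [hP, hT, LB_tt]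
      simp
    · rw [hP, Bool.eq_false_iff.2 hT, LB_tf, hP]
      simp only [Bool.not_true, Bool.not_false, Bool.false_eq_true, Bool.true_and, Bool.false_and,
        Bool.and_false, if_true, if_false, List.nil_append]
      rw [LA_comp]
  · by_cases hT : lines.any (pvIsMeta "**Completed At**:") = true
    · rw [Bool.eq_false_iff.2 hP, hT, LB_ft]
      simp only [Bool.not_true, Bool.not_false, Bool.false_eq_true, Bool.true_and, Bool.false_and,
        Bool.and_false, if_true, if_false, List.nil_append]
      rw [LA_cur]
      by_cases hC : lines.any (pvIsMeta "**Current Actor**:") = true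
      · simp [hC]
      · rw [Bool.eq_false_iff.2 hC]
        simp only [Bool.false_eq_true, if_false, Bool.not_false, Bool.true_and, if_true]
        rw [curScan_nomatch false ca na ts lines (fun x hx => Bool.eq_false_iff.2 ((List.any_eq_false).1 (Bool.eq_false_iff.2 hC) x hx))]
        simp
    · have hv : ∀ l ∈ lines, pvIsMeta "**Previous Actor**:" l = false :=
        fun x hx => Bool.eq_false_iff.2 ((List.any_eq_false).1 (Bool.eq_false_iff.2 hP) x hx)
      rw [Bool.eq_false_iff.2 hP, Bool.eq_false_iff.2 hT, LB_ff ca na ts lines hv]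
      simp only [Bool.not_true, Bool.not_false, Bool.false_eq_true, Bool.true_and, Bool.false_and,
        Bool.and_false, if_true, if_false, List.nil_append]
      rw [LA_cur, LA_cur_comp ca na ts lines hv]
      by_cases hC : lines.any (pvIsMeta "**Current Actor**:") = true
      · simp [hC]
      · rw [Bool.eq_false_iff.2 hC]
        simp only [Bool.false_eq_true, if_false, Bool.not_false, Bool.true_and, if_true]
        rw [curScan_nomatch true ca na ts lines (fun x hx => Bool.eq_false_iff.2 ((List.any_eq_false).1 (Bool.eq_false_iff.2 hC) x hx))]
        simp

-- ===== VERDICT (by name: the statement is the Claim_ definition above) =====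
theorem update_order_content_py_spec : Claim_equal_update_order_content_py := by
  intro text ca na ts _
  unfold Spec_update_order_content_py update_order_content_py update_order_content_py_alt
  have h := pvLines_eq ca na ts (PySem.Str.splitlines text)
  simp only at h ⊢
  rw [h]
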